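-- pv_equiv track=rewrite | github.com/afrikanjoe/Yeet | Facebook/Python/SlowSums.py | getTotalTime
-- ===== SOURCE A (Python) =====
-- def getTotalTime(arr):
--   # Write your code here
--   penalty = 0
--   while len(arr)>1:
--     max1_index=arr.index(max(arr))
--     val1 = arr.pop(max1_index)
--     max2_index=arr.index(max(arr))
--     val2 = arr.pop(max2_index)
--     penalty+= (val1+val2)
--     arr.append(val1+val2)
--   return penalty
-- ===== SOURCE B (Python) =====
-- def getTotalTime(arr):
--     # Keep a descending-sorted working list; each round merges the first two
--     # elements and re-inserts their sum at its sorted position.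
--     xs = sorted(arr, reverse=True)
--     penalty = 0
--     while len(xs) > 1:
--         s = xs[0] + xs[1]
--         penalty += s
--         rest = xs[2:]
--         i = 0
--         while i < len(rest) and rest[i] > s:
--             i += 1
--         rest.insert(i, s)
--         xs = rest
--     return penalty
-- ===== Notes on version B (the rewrite author's own statement) =====
-- stated objective: faster
-- what changed: B sorts the list descending once and then simulates each merge by taking the first two elements of the sorted working list and re-inserting their sum at its ordered position, replacing A's per-round max(), index() and two pop() scans (plus list shifting) with a single ordered insertion per round.
import Mathlib
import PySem

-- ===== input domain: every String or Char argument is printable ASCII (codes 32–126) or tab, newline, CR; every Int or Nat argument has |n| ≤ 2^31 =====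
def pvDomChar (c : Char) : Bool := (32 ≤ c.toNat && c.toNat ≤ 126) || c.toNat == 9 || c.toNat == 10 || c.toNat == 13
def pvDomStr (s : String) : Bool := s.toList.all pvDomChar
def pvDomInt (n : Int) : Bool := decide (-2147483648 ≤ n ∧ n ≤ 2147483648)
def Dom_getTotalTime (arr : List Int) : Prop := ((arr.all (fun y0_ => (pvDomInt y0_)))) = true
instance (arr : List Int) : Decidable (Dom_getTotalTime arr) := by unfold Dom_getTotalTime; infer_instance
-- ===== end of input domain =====

-- B replaces A's per-round max/index/pop scans by one sorted working list with ordered re-insertion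
-- (objective: alternative/constant-factor; return values proved equal). A mutates its argument list
-- in place (it is consumed down to one element); B does not — the equivalence proved is about the return value.

-- ===== PORT A =====
def loopA (arr : List Int) (penalty : Int) : Int :=
  if _h : 1 < arr.length then
    match PySem.List.max? arr (fun x => x) with
    | none => penalty
    | some v1 =>
      match PySem.List.index? arr v1 with
      | none => penalty
      | some i1 =>
        match h3 : PySem.List.pop? arr (i1 : Int) with
        | none => penalty
        | some (val1, arr1) =>
          match PySem.List.max? arr1 (fun x => x) with
          | none => penalty
          | some v2 =>
            match PySem.List.index? arr1 v2 with
            | none => penalty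
            | some i2 =>
              match h6 : PySem.List.pop? arr1 (i2 : Int) with
              | none => penalty
              | some (val2, arr2) =>
                loopA (arr2 ++ [val1 + val2]) (penalty + (val1 + val2))
  else penalty
termination_by arr.length
decreasing_by
  have h1 := PySem.List.length_of_pop?_eq_some arr h3
  have h2 := PySem.List.length_of_pop?_eq_some arr1 h6
  simp at h1 h2 ⊢
  omega

def getTotalTime (arr : List Int) : Int := loopA arr 0

-- ===== PORT B =====
def insertDesc (s : Int) : List Int → List Int
  | [] => [s]
  | x :: xs => if x > s then x :: insertDesc s xs else s :: x :: xs

theorem length_insertDesc (s : Int) (l : List Int) :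
    (insertDesc s l).length = l.length + 1 := by
  induction l with
  | nil => rfl
  | cons x xs ih => simp only [insertDesc]; split <;> simp [ih]

def loopB (xs : List Int) (p : Int) : Int :=
  match xs with
  | a :: b :: rest => loopB (insertDesc (a + b) rest) (p + (a + b))
  | _ => p
termination_by xs.length
decreasing_by simp [length_insertDesc]

def getTotalTime_alt (arr : List Int) : Int :=
  loopB (PySem.List.sorted arr (fun x => x) true) 0

-- ===== PRECONDITION & SPEC =====
def Spec_getTotalTime (arr : List Int) (out : Int) : Prop := out = getTotalTime_alt arr
instance (arr : List Int) (out : Int) : Decidable (Spec_getTotalTime arr out) := by unfold Spec_getTotalTime; infer_instance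

-- ===== CLAIM (what is proved, stated in full; the proofs are below) =====
def Claim_equal_getTotalTime : Prop := ∀ (arr : List Int), Dom_getTotalTime arr → Spec_getTotalTime arr (getTotalTime arr)

-- ===== LEMMAS AND PROOFS =====

theorem max?_id_eq_of (l : List Int) (v : Int) (hv : v ∈ l) (hle : ∀ y ∈ l, y ≤ v) :
    PySem.List.max? l (fun x => x) = some v := by
  cases h : PySem.List.max? l (fun x => x) with
  | none =>
      rw [PySem.List.max?_eq_none_iff] at h
      subst h; simp at hv
  | some m =>
      have hm := PySem.List.max?_mem h
      have hmax := PySem.List.max?_isMax h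
      have : m = v := le_antisymm (hle m hm) (hmax v hv)
      rw [this]

theorem pop_at_index? (xs : List Int) (v : Int) (k : Nat)
    (h : PySem.List.index? xs v = some k) :
    PySem.List.pop? xs (k : Int) = some (v, xs.erase v) := by
  obtain ⟨pre, suf, rfl, hk, hnp⟩ := (PySem.List.index?_eq_some_iff _ _ _).mp h
  subst hk
  have hlt : pre.length < (pre ++ v :: suf).length := by simp
  rw [PySem.List.pop?_natCast _ _ hlt]
  have hget : (pre ++ v :: suf)[pre.length] = v := by
    simp [List.getElem_append_right (Nat.le_refl pre.length)]
  have herI : (pre ++ v :: suf).eraseIdx pre.length = pre ++ suf := by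
    rw [List.eraseIdx_append_of_length_le (Nat.le_refl pre.length)]
    simp
  have herE : (pre ++ v :: suf).erase v = pre ++ suf := by
    rw [List.erase_append_right _ hnp, List.erase_cons_head]
  rw [hget, herI, herE]

theorem mem_insertDesc (s y : Int) (l : List Int) :
    y ∈ insertDesc s l ↔ y = s ∨ y ∈ l := by
  induction l with
  | nil => simp [insertDesc]
  | cons x xs ih =>
      simp only [insertDesc]
      split
      · simp [ih]
        try tauto
      · simp
        try tauto

theorem insertDesc_perm (s : Int) (l : List Int) :
    (insertDesc s l).Perm (s :: l) := by
  induction l with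
  | nil => simp [insertDesc]
  | cons x xs ih =>
      simp only [insertDesc]
      split
      · exact (ih.cons x).trans (List.Perm.swap s x xs)
      · exact List.Perm.refl _

theorem insertDesc_pairwise (s : Int) (l : List Int)
    (h : l.Pairwise (fun a b => b ≤ a)) :
    (insertDesc s l).Pairwise (fun a b => b ≤ a) := by
  induction l with
  | nil => simp [insertDesc]
  | cons x xs ih =>
      rw [List.pairwise_cons] at h
      obtain ⟨hx, hxs⟩ := h
      simp only [insertDesc]
      split
      · rename_i hgt
        rw [List.pairwise_cons]
        refine ⟨?_, ih hxs⟩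
        intro y hy
        rcases (mem_insertDesc s y xs).mp hy with rfl | hy'
        · exact le_of_lt hgt
        · exact hx y hy'
      · rename_i hngt
        rw [List.pairwise_cons]
        refine ⟨?_, by rw [List.pairwise_cons]; exact ⟨hx, hxs⟩⟩
        intro y hy
        rcases List.mem_cons.mp hy with rfl | hy'
        · exact le_of_not_gt hngt
        · exact le_trans (hx y hy') (le_of_not_gt hngt)

theorem loopA_eq_loopB (n : Nat) :
    ∀ (l1 l2 : List Int) (p : Int), l1.length = n → l1.Perm l2 →
      l2.Pairwise (fun a b => b ≤ a) → loopA l1 p = loopB l2 p := by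
  induction n using Nat.strong_induction_on with
  | _ n ih =>
    intro l1 l2 p hn hperm hpw
    match l2 with
    | [] =>
        have : l1 = [] := hperm.eq_nil
        subst this
        rw [loopA.eq_def, loopB.eq_def]
        simp
    | [x] =>
        have hl : l1.length = 1 := by rw [hperm.length_eq]; rfl
        rw [loopA.eq_def, loopB.eq_def]
        simp [hl]
    | a :: b :: rest =>
        have hlen : l1.length = rest.length + 2 := by rw [hperm.length_eq]; simp
        -- facts about a and b
        rw [List.pairwise_cons] at hpw
        obtain ⟨ha, hpw1⟩ := hpw
        rw [List.pairwise_cons] at hpw1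
        obtain ⟨hb, hpw2⟩ := hpw1
        have hamem : a ∈ l1 := hperm.mem_iff.mpr (by simp)
        have hamax : ∀ y ∈ l1, y ≤ a := by
          intro y hy
          rcases List.mem_cons.mp (hperm.mem_iff.mp hy) with rfl | hy'
          · exact le_refl _
          · exact ha y hy'
        have hmax1 : PySem.List.max? l1 (fun x => x) = some a := max?_id_eq_of _ _ hamem hamax
        obtain ⟨k1, hk1⟩ := Option.isSome_iff_exists.mp ((PySem.List.index?_isSome_iff _ _).mpr hamem)
        have hpop1 := pop_at_index? l1 a k1 hk1
        have hperm1 : (l1.erase a).Perm (b :: rest) := by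
          have := hperm.erase a
          rwa [List.erase_cons_head] at this
        have hbmem : b ∈ l1.erase a := hperm1.mem_iff.mpr (by simp)
        have hbmax : ∀ y ∈ l1.erase a, y ≤ b := by
          intro y hy
          rcases List.mem_cons.mp (hperm1.mem_iff.mp hy) with rfl | hy'
          · exact le_refl _
          · exact hb y hy'
        have hmax2 : PySem.List.max? (l1.erase a) (fun x => x) = some b :=
          max?_id_eq_of _ _ hbmem hbmax
        obtain ⟨k2, hk2⟩ := Option.isSome_iff_exists.mp
          ((PySem.List.index?_isSome_iff _ _).mpr hbmem)
        have hpop2 := pop_at_index? (l1.erase a) b k2 hk2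
        have hperm2 : ((l1.erase a).erase b).Perm rest := by
          have := hperm1.erase b
          rwa [List.erase_cons_head] at this
        -- unfold one round on each side
        rw [loopA.eq_def]
        rw [dif_pos (by omega)]
        simp only [hmax1, hk1]
        split
        · rename_i heq
          rw [hpop1] at heq
          cases heq
        rename_i val1 arr1 heq
        rw [hpop1] at heq
        simp only [Option.some.injEq, Prod.mk.injEq] at heq
        obtain ⟨rfl, rfl⟩ := heq
        simp only [hmax2, hk2]
        split
        · rename_i heq2
          rw [hpop2] at heq2
          cases heq2
        rename_i val2 arr2 heq2
        rw [hpop2] at heq2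
        simp only [Option.some.injEq, Prod.mk.injEq] at heq2
        obtain ⟨rfl, rfl⟩ := heq2
        -- recursive call (the loopB side reduces definitionally on the cons-cons pattern)
        have hperm3 : (((l1.erase a).erase b) ++ [a + b]).Perm (insertDesc (a + b) rest) := by
          refine (List.perm_append_singleton _ _).trans ?_
          exact ((hperm2.cons (a + b)).trans (insertDesc_perm (a + b) rest).symm)
        have hpw3 : (insertDesc (a + b) rest).Pairwise (fun a b => b ≤ a) :=
          insertDesc_pairwise _ _ hpw2
        have hlt : (((l1.erase a).erase b) ++ [a + b]).length < n := by
          have := hperm2.length_eq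
          simp at this ⊢
          omega
        rw [loopB.eq_def]
        exact ih _ hlt _ _ _ rfl hperm3 hpw3

-- ===== VERDICT (by name: the statement is the Claim_ definition above) =====
theorem getTotalTime_spec : Claim_equal_getTotalTime := by
  intro arr _
  unfold Spec_getTotalTime getTotalTime getTotalTime_alt
  exact loopA_eq_loopB arr.length arr _ 0 rfl
    (PySem.List.sorted_perm arr (fun x => x) true).symm
    (PySem.List.sorted_pairwise_rev arr (fun x => x))
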